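-- pv_equiv track=rewrite | github.com/Lukasz1928/advent-of-code | solutions/2016/day14/task1/main.py | is_key
-- ===== SOURCE A (Python) =====
-- def find_triple_digits(h):
--     for i in range(len(h) - 2):
--         if h[i] == h[i + 1] == h[i + 2]:
--             return h[i]
--     return None
--
-- def has_5_same_digits(h, digit):
--     return (digit * 5) in h
--
-- def is_key(hashes, index):
--     d = find_triple_digits(hashes[index])
--     if d is None:
--         return False
--     for i in range(1, 1001):
--         if has_5_same_digits(hashes[index + i], d):
--             return True
--     return False
-- ===== SOURCE B (Python) =====
-- def is_key(hashes, index):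
--     # Find the first triple by substring search per distinct character:
--     # for each character c occurring in the hash, locate the first occurrence
--     # of c*3 with str.find, and keep the character whose occurrence is earliest.
--     h = hashes[index]
--     d, best = None, None
--     for c in set(h):
--         p = h.find(c * 3)
--         if p != -1 and (best is None or p < best):
--             best, d = p, c
--     if d is None:
--         return False
--     quint = d * 5
--     return any(quint in hashes[index + i] for i in range(1, 1001))
-- ===== Notes on version B (the rewrite author's own statement) =====
-- stated objective: alternative
-- what changed: The first triple is found by per-character substring search (h.find(c*3) for each distinct character, keeping the earliest match) instead of A's index loop comparing overlapping 3-windows; the 1000-follower quintuple check becomes a lazy any() over a generator.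
import Mathlib
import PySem

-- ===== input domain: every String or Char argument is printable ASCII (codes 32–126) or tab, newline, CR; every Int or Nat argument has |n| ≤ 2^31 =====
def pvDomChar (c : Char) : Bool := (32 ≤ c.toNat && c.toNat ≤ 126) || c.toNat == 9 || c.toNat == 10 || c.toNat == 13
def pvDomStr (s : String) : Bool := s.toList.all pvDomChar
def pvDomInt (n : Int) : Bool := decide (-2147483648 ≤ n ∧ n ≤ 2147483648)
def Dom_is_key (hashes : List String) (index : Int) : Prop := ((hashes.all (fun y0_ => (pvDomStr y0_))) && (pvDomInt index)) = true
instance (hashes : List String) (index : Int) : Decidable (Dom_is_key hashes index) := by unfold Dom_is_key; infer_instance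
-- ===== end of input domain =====

-- B finds the triple by per-character substring search (find of c*3 over the distinct
-- characters, keeping the earliest match) instead of A's indexed overlapping-3-window loop,
-- and folds the follower check into an any; alternative algorithm, same cost.


-- ===== PORT A =====
-- find_triple_digits: loop over i in range(len(h)-2), compare h[i], h[i+1], h[i+2]
def pv_ftd_go (l : List Char) : List Int → Option Char
  | [] => none
  | i :: rest =>
    match PySem.List.pyGet? l i, PySem.List.pyGet? l (i+1), PySem.List.pyGet? l (i+2) with
    | some a, some b, some c => if a = b ∧ b = c then some a else pv_ftd_go l rest
    | _, _, _ => none            -- IndexError (unreachable: range indices are in range)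

def find_triple_digits (h : String) : Option Char :=
  pv_ftd_go h.toList (PySem.List.pyRange 0 ((h.toList.length : Int) - 2) 1)

def has_5_same_digits (h : String) (digit : Char) : Bool :=
  PySem.Str.isIn (String.ofList (List.replicate 5 digit)) h

-- for i in range(1, 1001): if has_5_same_digits(hashes[index+i], d): return True
def pv_loopA (hashes : List String) (index : Int) (d : Char) : List Int → Bool
  | [] => false
  | i :: rest =>
    match PySem.List.pyGet? hashes (index + i) with
    | none => false              -- IndexError (excluded by Pre_)
    | some h => if has_5_same_digits h d then true else pv_loopA hashes index d rest

def is_key (hashes : List String) (index : Int) : Bool :=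
  match PySem.List.pyGet? hashes index with
  | none => false                -- IndexError (excluded by Pre_)
  | some h0 =>
    match find_triple_digits h0 with
    | none => false
    | some d => pv_loopA hashes index d (PySem.List.pyRange 1 1001 1)

-- ===== PORT B =====
-- for c in set(h): p = h.find(c*3); if p != -1 and (best is None or p < best): best, d = p, c
def pv_pick (h : List Char) : List Char → Option Int × Option Char → Option Int × Option Char
  | [], st => st
  | c :: cs, st =>
    let p := PySem.Chars.find h (List.replicate 3 c)
    let ok : Bool := (p != -1) && (match st.1 with | none => true | some b => decide (p < b))
    pv_pick h cs (if ok then (some p, some c) else st)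

def find_triple_alt (h : String) : Option Char :=
  (pv_pick h.toList (PySem.Set.ofList h.toList) (none, none)).2

def is_key_alt (hashes : List String) (index : Int) : Bool :=
  match PySem.List.pyGet? hashes index with
  | none => false                -- IndexError (excluded by Pre_)
  | some h0 =>
    match find_triple_alt h0 with
    | none => false
    | some d =>
      (PySem.List.pyRange 1 1001 1).any fun i =>
        match PySem.List.pyGet? hashes (index + i) with
        | none => false          -- IndexError (excluded by Pre_)
        | some h => PySem.Str.isIn (String.ofList (List.replicate 5 d)) h

-- ===== PRECONDITION & SPEC =====
-- Pre_ excludes exactly the inputs on which A raises IndexError (B raises identically there):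
-- an out-of-range start index, or a hash whose first triple character has no quintuple among
-- the in-range followers while the 1000-hash window runs past the end of the list.
def Pre_is_key (hashes : List String) (index : Int) : Prop :=
  PySem.Raise.InRange hashes.length index ∧
  ∀ h ∈ (PySem.List.pyGet? hashes index).toList,
    ∀ d ∈ h.toList, ∀ i < h.toList.length,
      List.replicate 3 d <+: h.toList.drop i →
      (∀ j < i, ∀ c ∈ h.toList, ¬ List.replicate 3 c <+: h.toList.drop j) →
      (index + 1000 < (hashes.length : Int) ∨
       ∃ i' ∈ PySem.List.pyRange 1 1001 1, index + i' < (hashes.length : Int) ∧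
         ∀ h' ∈ (PySem.List.pyGet? hashes (index + i')).toList,
           PySem.Chars.isIn (List.replicate 5 d) h'.toList = true)

instance (hashes : List String) (index : Int) : Decidable (Pre_is_key hashes index) := by
  unfold Pre_is_key; infer_instance

def pvWitness_is_key : List String × Int := (["abc"], 0)

def Spec_is_key (hashes : List String) (index : Int) (out : Bool) : Prop := out = is_key_alt hashes index
instance (hashes : List String) (index : Int) (out : Bool) : Decidable (Spec_is_key hashes index out) := by unfold Spec_is_key; infer_instance

-- ===== CLAIM (what is proved, stated in full; the proofs are below) =====
def Claim_equal_is_key : Prop := ∀ (hashes : List String) (index : Int), Dom_is_key hashes index → Pre_is_key hashes index → Spec_is_key hashes index (is_key hashes index)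

-- ===== LEMMAS AND PROOFS =====

-- clean structural version of A's triple finder, used as a bridge
def ftd3 : List Char → Option Char
  | a :: b :: c :: t => if a = b ∧ b = c then some a else ftd3 (b :: c :: t)
  | _ => none

theorem ftd3_short (l : List Char) (hl : l.length < 3) : ftd3 l = none := by
  match l, hl with
  | [], _ => rfl
  | [_], _ => rfl
  | [_, _], _ => rfl

theorem pv_ftd_go_eq (l : List Char) (k : Nat) :
    pv_ftd_go l (PySem.List.pyRange (k : Int) ((l.length : Int) - 2) 1) = ftd3 (l.drop k) := by
  by_cases h : (l.length : Int) - 2 ≤ (k : Int)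
  · rw [PySem.List.pyRange_one_eq_nil h]
    have : (l.drop k).length < 3 := by simp; omega
    simp [pv_ftd_go, ftd3_short _ this]
  · push_neg at h
    have hk2 : k + 2 < l.length := by omega
    rw [PySem.List.pyRange_one_cons (by omega)]
    have g0 : PySem.List.pyGet? l (k : Int) = some l[k] :=
      PySem.List.pyGet?_ofNat l k (by omega)
    have g1 : PySem.List.pyGet? l ((k : Int) + 1) = some l[k+1] := by
      have := PySem.List.pyGet?_ofNat l (k+1) (by omega)
      simpa [Nat.cast_add] using this
    have g2 : PySem.List.pyGet? l ((k : Int) + 2) = some l[k+2] := by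
      have := PySem.List.pyGet?_ofNat l (k+2) (by omega)
      simpa [Nat.cast_add] using this
    have hdrop : l.drop k = l[k] :: l[k+1] :: l[k+2] :: l.drop (k+3) := by
      rw [List.drop_eq_getElem_cons (by omega), List.drop_eq_getElem_cons (by omega),
          List.drop_eq_getElem_cons (by omega)]
    have hrec := pv_ftd_go_eq l (k + 1)
    have hdrop1 : l.drop (k+1) = l[k+1] :: l[k+2] :: l.drop (k+3) := by
      rw [List.drop_eq_getElem_cons (by omega), List.drop_eq_getElem_cons (by omega)]
    rw [hdrop]
    show pv_ftd_go l ((k : Int) :: _) = _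
    rw [pv_ftd_go, g0]
    rw [show (k : Int) + 1 = ((k : Int) + 1) from rfl, g1, g2]
    by_cases hc : l[k] = l[k+1] ∧ l[k+1] = l[k+2]
    · simp [ftd3, hc]
    · simp only [hc, if_false, ftd3]
      have : PySem.List.pyRange ((k : Int) + 1) ((l.length : Int) - 2) 1
           = PySem.List.pyRange (((k+1 : Nat) : Int)) ((l.length : Int) - 2) 1 := by
        push_cast; ring_nf
      rw [this, hrec, hdrop1]
termination_by l.length - k

-- replicate 3 c is a prefix of m iff m starts with c, c, c
theorem rep3_prefix_iff (c : Char) (m : List Char) :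
    List.replicate 3 c <+: m ↔ ∃ t, m = c :: c :: c :: t := by
  constructor
  · rintro ⟨t, ht⟩; exact ⟨t, by simpa [List.replicate] using ht.symm⟩
  · rintro ⟨t, rfl⟩; exact ⟨t, by simp [List.replicate]⟩

-- A's finder returns none iff no position carries a triple
theorem ftd3_eq_none (l : List Char) (h : ftd3 l = none) :
    ∀ j : Nat, ∀ c : Char, ¬ List.replicate 3 c <+: l.drop j := by
  match l with
  | [] => intro j c hp; have := hp.length_le; simp [List.replicate] at this
  | [_] => intro j c hp; have := hp.length_le; simp [List.replicate] at this; omega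
  | [_, _] => intro j c hp; have := hp.length_le; simp [List.replicate] at this; omega
  | a :: b :: c :: t =>
    rw [ftd3] at h
    by_cases hc : a = b ∧ b = c
    · simp [hc] at h
    · rw [if_neg hc] at h
      intro j c' hp
      match j with
      | 0 =>
        rw [List.drop_zero, rep3_prefix_iff] at hp
        obtain ⟨t', ht'⟩ := hp
        cases ht'
        exact hc ⟨rfl, rfl⟩
      | j' + 1 =>
        rw [List.drop_succ_cons] at hp
        exact ftd3_eq_none (b :: c :: t) h j' c' hp

-- A's finder returns some d iff d heads the first triple position
theorem ftd3_eq_some (l : List Char) (d : Char) (h : ftd3 l = some d) :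
    ∃ i : Nat, List.replicate 3 d <+: l.drop i ∧
      ∀ j < i, ∀ c : Char, ¬ List.replicate 3 c <+: l.drop j := by
  match l with
  | [] => simp [ftd3] at h
  | [_] => simp [ftd3] at h
  | [_, _] => simp [ftd3] at h
  | a :: b :: c :: t =>
    rw [ftd3] at h
    by_cases hc : a = b ∧ b = c
    · rw [if_pos hc] at h
      obtain ⟨rfl, rfl⟩ := hc
      injection h with h; subst h
      exact ⟨0, by rw [List.drop_zero, rep3_prefix_iff]; exact ⟨t, rfl⟩, by omega⟩
    · rw [if_neg hc] at h
      obtain ⟨i, hp, hmin⟩ := ftd3_eq_some (b :: c :: t) d h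
      refine ⟨i + 1, by rwa [List.drop_succ_cons], ?_⟩
      intro j hj c' hp'
      match j with
      | 0 =>
        rw [List.drop_zero, rep3_prefix_iff] at hp'
        obtain ⟨t', ht'⟩ := hp'
        cases ht'
        exact hc ⟨rfl, rfl⟩
      | j' + 1 =>
        rw [List.drop_succ_cons] at hp'
        exact hmin j' (by omega) c' hp'

-- find locates exactly the first triple position for its character
theorem find_at_min (l : List Char) (d : Char) (i : Nat)
    (Hp : List.replicate 3 d <+: l.drop i)
    (Hmin : ∀ j < i, ∀ c : Char, ¬ List.replicate 3 c <+: l.drop j) :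
    PySem.Chars.find l (List.replicate 3 d) = (i : Int) := by
  have hinf : List.replicate 3 d <:+: l := by
    obtain ⟨t, ht⟩ := Hp
    exact ⟨l.take i, t, by rw [List.append_assoc, ht, List.take_append_drop]⟩
  have hnn : 0 ≤ PySem.Chars.find l (List.replicate 3 d) :=
    (PySem.Chars.find_nonneg_iff l (List.replicate 3 d)).2 hinf
  obtain ⟨hfp, hfmin⟩ := PySem.Chars.find_spec hnn
  set p := PySem.Chars.find l (List.replicate 3 d) with hp
  have h1 : i ≤ p.toNat := by
    by_contra hlt
    exact Hmin p.toNat (by omega) d hfp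
  have h2 : p.toNat ≤ i := by
    by_contra hlt
    exact hfmin i (by omega) Hp
  omega

-- any other character's triple, if present, occurs strictly after position i
theorem find_other (l : List Char) (d : Char) (i : Nat) (c : Char) (hcd : c ≠ d)
    (Hp : List.replicate 3 d <+: l.drop i)
    (Hmin : ∀ j < i, ∀ c' : Char, ¬ List.replicate 3 c' <+: l.drop j) :
    PySem.Chars.find l (List.replicate 3 c) = -1 ∨
      (i : Int) < PySem.Chars.find l (List.replicate 3 c) := by
  by_cases hne : PySem.Chars.find l (List.replicate 3 c) = -1
  · exact Or.inl hne
  · right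
    have hinf : List.replicate 3 c <:+: l :=
      (PySem.Chars.find_ne_neg_one_iff l (List.replicate 3 c)).1 hne
    have hnn : 0 ≤ PySem.Chars.find l (List.replicate 3 c) :=
      (PySem.Chars.find_nonneg_iff l (List.replicate 3 c)).2 hinf
    obtain ⟨hfp, _⟩ := PySem.Chars.find_spec hnn
    set p := PySem.Chars.find l (List.replicate 3 c) with hpdef
    have hgei : i ≤ p.toNat := by
      by_contra hlt
      exact Hmin p.toNat (by omega) c hfp
    have hnei : p.toNat ≠ i := by
      intro he
      rw [he, rep3_prefix_iff] at hfp
      rw [rep3_prefix_iff] at Hp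
      obtain ⟨t1, ht1⟩ := hfp
      obtain ⟨t2, ht2⟩ := Hp
      rw [ht1] at ht2
      injection ht2 with h1 _
      exact hcd h1
    omega

-- the fold never updates when every character's triple-find fails
theorem pick_none (l : List Char) (cs : List Char)
    (H : ∀ c ∈ cs, PySem.Chars.find l (List.replicate 3 c) = -1) (st : Option Int × Option Char) :
    pv_pick l cs st = st := by
  induction cs generalizing st with
  | nil => rfl
  | cons c cs ih =>
    rw [pv_pick]
    have hc := H c (by simp)
    simp only [hc]
    have : ((-1 : Int) != -1) = false := by decide
    rw [this, Bool.false_and, if_neg (by simp)]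
    exact ih (fun c' hc' => H c' (by simp [hc'])) st

-- once the first triple is held, no later character displaces it
theorem pick_skip (l : List Char) (i : Nat) (d : Char) (cs : List Char)
    (H : ∀ c ∈ cs, PySem.Chars.find l (List.replicate 3 c) = -1 ∨
          (i : Int) ≤ PySem.Chars.find l (List.replicate 3 c)) :
    pv_pick l cs (some (i : Int), some d) = (some (i : Int), some d) := by
  induction cs with
  | nil => rfl
  | cons c cs ih =>
    rw [pv_pick]
    have hok : ((PySem.Chars.find l (List.replicate 3 c) != -1) &&
        decide (PySem.Chars.find l (List.replicate 3 c) < (i : Int))) = false := by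
      rcases H c (by simp) with h | h
      · rw [h]; rfl
      · have : decide (PySem.Chars.find l (List.replicate 3 c) < (i : Int)) = false := by
          simp only [decide_eq_false_iff_not]; omega
        rw [this, Bool.and_false]
    show pv_pick l cs (if ((PySem.Chars.find l (List.replicate 3 c) != -1) &&
        decide (PySem.Chars.find l (List.replicate 3 c) < (i : Int))) = true
        then _ else _) = _
    rw [hok, if_neg (by simp)]
    exact ih (fun c' hc' => H c' (by simp [hc']))

-- the state before the first triple's character is reached: no best, or a later best
def pvQ (i : Nat) (st : Option Int × Option Char) : Prop :=
  st.1 = none ∨ ∃ b : Int, st.1 = some b ∧ (i : Int) < b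

-- main fold lemma: with the first triple at i headed by d, the fold ends holding d
theorem pick_main (l : List Char) (d : Char) (i : Nat)
    (Hp : List.replicate 3 d <+: l.drop i)
    (Hmin : ∀ j < i, ∀ c : Char, ¬ List.replicate 3 c <+: l.drop j)
    (cs : List Char) (hdm : d ∈ cs) (st : Option Int × Option Char) (hQ : pvQ i st) :
    (pv_pick l cs st).2 = some d := by
  induction cs generalizing st with
  | nil => simp at hdm
  | cons c cs ih =>
    rw [pv_pick]
    by_cases hcd : c = d
    · subst hcd
      have hfd : PySem.Chars.find l (List.replicate 3 c) = (i : Int) := find_at_min l c i Hp Hmin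
      have hok : ((PySem.Chars.find l (List.replicate 3 c) != -1) &&
          (match st.1 with
           | none => true
           | some b => decide (PySem.Chars.find l (List.replicate 3 c) < b))) = true := by
        rw [hfd]
        have h1 : (((i : Int)) != -1) = true := by
          simp only [bne_iff_ne, ne_eq]; omega
        rcases hQ with h | ⟨b, hb, hib⟩
        · rw [h, h1]; rfl
        · rw [hb, h1]
          simp only [Bool.true_and, decide_eq_true_eq]
          exact hib
      rw [hok, if_pos rfl, hfd]
      have hsk : pv_pick l cs (some (i : Int), some c) = (some (i : Int), some c) := by
        apply pick_skip
        intro c' hc'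
        by_cases hc'd : c' = c
        · subst hc'd; right; rw [hfd]
        · rcases find_other l c i c' hc'd Hp Hmin with h | h
          · exact Or.inl h
          · right; omega
      rw [hsk]
    · have hdm' : d ∈ cs := by
        rcases List.mem_cons.1 hdm with h | h
        · exact absurd h.symm hcd
        · exact h
      apply ih hdm'
      split_ifs with hok
      · right
        refine ⟨PySem.Chars.find l (List.replicate 3 c), rfl, ?_⟩
        rcases find_other l d i c hcd Hp Hmin with h | h
        · exfalso; rw [h] at hok; simp at hok
        · exact h
      · exact hQ

-- B's finder agrees with the clean spec of A's finder
theorem find_triple_alt_eq (h : String) : find_triple_alt h = ftd3 h.toList := by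
  unfold find_triple_alt
  cases hft : ftd3 h.toList with
  | none =>
    rw [pick_none]
    intro c _
    rw [PySem.Chars.find_eq_neg_one_iff]
    intro hinf
    obtain ⟨j, hp⟩ := (PySem.Chars.exists_prefix_drop_iff_isIn (List.replicate 3 c) h.toList).2
      ((PySem.Chars.isIn_iff_infix (List.replicate 3 c) h.toList).2 hinf)
    exact ftd3_eq_none h.toList hft j c hp
  | some d =>
    obtain ⟨i, Hp, Hmin⟩ := ftd3_eq_some h.toList d hft
    have hdl : d ∈ h.toList := by
      rw [rep3_prefix_iff] at Hp
      obtain ⟨t, ht⟩ := Hp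
      have : d ∈ h.toList.drop i := by rw [ht]; simp
      exact List.mem_of_mem_drop this
    exact pick_main h.toList d i Hp Hmin (PySem.Set.ofList h.toList)
      ((PySem.Set.mem_ofList _ _).2 hdl) (none, none) (Or.inl rfl)

-- both follower scans agree when every access is in range
theorem loopA_eq_any (hashes : List String) (index : Int) (d : Char) (R : List Int)
    (H : ∀ i ∈ R, PySem.List.pyGet? hashes (index + i) ≠ none) :
    pv_loopA hashes index d R =
      R.any (fun i =>
        match PySem.List.pyGet? hashes (index + i) with
        | none => false
        | some h => PySem.Str.isIn (String.ofList (List.replicate 5 d)) h) := by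
  induction R with
  | nil => rfl
  | cons i rest ih =>
    have hi := H i (by simp)
    cases hg : PySem.List.pyGet? hashes (index + i) with
    | none => exact absurd hg hi
    | some h =>
      rw [pv_loopA, hg, List.any_cons, hg, ih (fun j hj => H j (by simp [hj]))]
      cases hb : PySem.Chars.isIn [d, d, d, d, d] h.toList <;>
        simp [has_5_same_digits, hb]

-- both follower scans return true when a quintuple is hit before any out-of-range access
theorem loop_any_true (hashes : List String) (index : Int) (d : Char)
    (R1 R2 : List Int) (i' : Int) (h' : String)
    (H1 : ∀ i ∈ R1, PySem.List.pyGet? hashes (index + i) ≠ none)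
    (Hg : PySem.List.pyGet? hashes (index + i') = some h')
    (Hq : PySem.Chars.isIn (List.replicate 5 d) h'.toList = true) :
    pv_loopA hashes index d (R1 ++ i' :: R2) = true ∧
    (R1 ++ i' :: R2).any (fun i =>
        match PySem.List.pyGet? hashes (index + i) with
        | none => false
        | some h => PySem.Str.isIn (String.ofList (List.replicate 5 d)) h) = true := by
  have hq5 : has_5_same_digits h' d = true := by
    simp only [has_5_same_digits, PySem.Str.isIn_eq]
    simpa using Hq
  induction R1 with
  | nil =>
    refine ⟨?_, ?_⟩
    · rw [List.nil_append, pv_loopA, Hg]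
      show (if has_5_same_digits h' d = true then true else pv_loopA hashes index d R2) = true
      rw [if_pos hq5]
    · rw [List.nil_append, List.any_cons, Hg]
      show ((PySem.Str.isIn (String.ofList (List.replicate 5 d)) h') || _) = true
      have hs : PySem.Str.isIn (String.ofList (List.replicate 5 d)) h' = true := by
        simp only [PySem.Str.isIn_eq]
        simpa using Hq
      rw [hs, Bool.true_or]
  | cons r R1 ih =>
    have hr := H1 r (by simp)
    obtain ⟨ihl, ihr⟩ := ih (fun j hj => H1 j (by simp [hj]))
    cases hg : PySem.List.pyGet? hashes (index + r) with
    | none => exact absurd hg hr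
    | some hh =>
      refine ⟨?_, ?_⟩
      · rw [List.cons_append, pv_loopA, hg]
        show (if has_5_same_digits hh d = true then true
              else pv_loopA hashes index d (R1 ++ i' :: R2)) = true
        split_ifs with hq
        · rfl
        · exact ihl
      · rw [List.cons_append, List.any_cons, ihr, Bool.or_true]

-- ===== VERDICT (by name: the statement is the Claim_ definition above) =====
theorem is_key_spec : Claim_equal_is_key := by
  intro hashes index _ hPre
  obtain ⟨hIR, hP⟩ := hPre
  unfold Spec_is_key
  cases hg : PySem.List.pyGet? hashes index with
  | none =>
    exfalso
    rw [PySem.List.pyGet?_eq_none_iff] at hg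
    exact hg hIR
  | some h0 =>
    have hftdA : find_triple_digits h0 = ftd3 h0.toList := by
      unfold find_triple_digits
      have := pv_ftd_go_eq h0.toList 0
      simp only [Nat.cast_zero] at this
      rw [this, List.drop_zero]
    simp only [is_key, is_key_alt, hg, hftdA, find_triple_alt_eq]
    cases hft : ftd3 h0.toList with
    | none => rfl
    | some d =>
      simp only []
      obtain ⟨i, Hp, Hmin⟩ := ftd3_eq_some h0.toList d hft
      have hdl : d ∈ h0.toList := by
        rw [rep3_prefix_iff] at Hp
        obtain ⟨t, ht⟩ := Hp
        have : d ∈ h0.toList.drop i := by rw [ht]; simp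
        exact List.mem_of_mem_drop this
      have hil : i < h0.toList.length := by
        have h3 := Hp.length_le
        rw [List.length_replicate, List.length_drop] at h3
        omega
      obtain ⟨hlo, hhi⟩ : -(hashes.length : Int) ≤ index ∧ index < (hashes.length : Int) := hIR
      have hdisj := hP h0 (by rw [hg]; simp) d hdl i hil Hp
        (fun j hj c _ => Hmin j hj c)
      rcases hdisj with hEsc | ⟨i', hi'R, hi'len, hi'q⟩
      · apply loopA_eq_any
        intro i hi
        rw [PySem.List.mem_pyRange_one] at hi
        rw [Ne, PySem.List.pyGet?_eq_none_iff, not_not]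
        constructor <;> omega
      · rw [PySem.List.mem_pyRange_one] at hi'R
        have hgin : PySem.Raise.InRange hashes.length (index + i') := by
          constructor <;> omega
        cases hg' : PySem.List.pyGet? hashes (index + i') with
        | none =>
          exfalso
          rw [PySem.List.pyGet?_eq_none_iff] at hg'
          exact hg' hgin
        | some h' =>
          have hq : PySem.Chars.isIn (List.replicate 5 d) h'.toList = true :=
            hi'q h' (by rw [hg']; simp)
          have hsplit : PySem.List.pyRange 1 1001 1
              = PySem.List.pyRange 1 i' 1 ++ i' :: PySem.List.pyRange (i' + 1) 1001 1 := by
            have hc : PySem.List.pyRange i' 1001 1 = i' :: PySem.List.pyRange (i' + 1) 1001 1 :=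
              PySem.List.pyRange_one_cons (by omega)
            rw [PySem.List.pyRange_one_append 1 i' 1001 (by omega) (by omega), hc]
          rw [hsplit]
          obtain ⟨hl, hr⟩ := loop_any_true hashes index d
            (PySem.List.pyRange 1 i' 1) (PySem.List.pyRange (i' + 1) 1001 1) i' h'
            (by
              intro j hj
              rw [PySem.List.mem_pyRange_one] at hj
              rw [Ne, PySem.List.pyGet?_eq_none_iff, not_not]
              constructor <;> omega)
            hg' hq
          rw [hl, hr]
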